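-- pv_equiv track=rewrite | github.com/aNonYmoussubot/Submisson_EMNLP | eval_scripts/utils.py | replace_outermost_boxed
-- ===== SOURCE A (Python) =====
-- def replace_outermost_boxed(text, new_content):
--     start = text.find(r'\boxed{')
--     if start == -1:
--         return text  # 没有boxed结构
--
--     i = start + len(r'\boxed{')
--     brace_count = 1
--     while i < len(text):
--         if text[i] == '{':
--             brace_count += 1
--         elif text[i] == '}':
--             brace_count -= 1
--             if brace_count == 0:
--                 end = i
--                 break
--         i += 1
--     else:
--         raise ValueError("Unmatched braces in \\boxed{} structure")
--
--     # 构造新的文本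
--     return text[:start] + f'\\boxed{{{new_content}}}' + text[end+1:]
-- ===== SOURCE B (Python) =====
-- def replace_outermost_boxed(text, new_content):
--     start = text.find(r'\boxed{')
--     if start == -1:
--         return text
--     depth = 1
--     pos = start + len(r'\boxed{')
--     while True:
--         nc = text.find('}', pos)
--         if nc == -1:
--             raise ValueError("Unmatched braces in \\boxed{} structure")
--         nb = text.find('{', pos)
--         if nb != -1 and nb < nc:
--             depth += 1
--             pos = nb + 1
--         else:
--             depth -= 1
--             if depth == 0:
--                 end = nc
--                 break
--             pos = nc + 1
--     return text[:start] + f'\\boxed{{{new_content}}}' + text[end+1:]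
-- ===== Notes on version B (the rewrite author's own statement) =====
-- stated objective: alternative
-- what changed: B replaces A's char-by-char while-loop with brace_count by an index-jumping scan that uses str.find to hop directly between successive '{' and '}' occurrences, updating a depth counter only at braces.
import Mathlib
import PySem

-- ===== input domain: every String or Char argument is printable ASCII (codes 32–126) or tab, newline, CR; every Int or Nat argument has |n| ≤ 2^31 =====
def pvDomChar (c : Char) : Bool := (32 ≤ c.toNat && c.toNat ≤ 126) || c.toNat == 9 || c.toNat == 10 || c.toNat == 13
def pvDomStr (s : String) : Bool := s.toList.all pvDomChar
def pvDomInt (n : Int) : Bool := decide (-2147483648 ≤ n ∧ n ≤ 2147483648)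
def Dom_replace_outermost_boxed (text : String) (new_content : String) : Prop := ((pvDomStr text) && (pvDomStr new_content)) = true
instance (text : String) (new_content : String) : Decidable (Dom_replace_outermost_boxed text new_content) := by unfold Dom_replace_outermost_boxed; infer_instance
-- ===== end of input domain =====

-- B replaces A's char-by-char brace-counting loop by an index-jumping scan that hops
-- between successive '{' / '}' occurrences (objective: alternative; return value only).

-- ===== PORT A =====
-- A's while-loop: char-by-char scan keeping brace_count; returns the index of the
-- matching '}' (none = the loop ran off the end, where Python raises ValueError).
def loopA (s : List Char) (i : Nat) (bc : Int) : Option Nat :=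
  if h : i < s.length then
    if s[i] = '{' then loopA s (i+1) (bc+1)
    else if s[i] = '}' then
      if bc - 1 = 0 then some i else loopA s (i+1) (bc-1)
    else loopA s (i+1) bc
  else none
  termination_by s.length - i

def replace_outermost_boxed (text : String) (new_content : String) : String :=
  let st := PySem.Str.find text "\\boxed{"
  if st = -1 then text
  else
    let s := text.toList
    let start := st.toNat
    match loopA s (start + 7) 1 with
    | some e =>
        String.ofList (s.take start ++ ("\\boxed{".toList ++ new_content.toList ++ ['}']) ++ s.drop (e+1))
    | none => text   -- Python raises ValueError here; excluded by Pre_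

-- ===== PORT B =====
-- Source B's text.find(c, pos), single-char needle, 0 ≤ pos: first index ≥ pos holding c
-- (none = Python's -1); exact on that domain.
def findIdxFrom (s : List Char) (c : Char) (pos : Nat) : Option Nat :=
  if h : pos < s.length then
    if s[pos] = c then some pos else findIdxFrom s c (pos+1)
  else none
  termination_by s.length - pos

theorem findIdxFrom_some (s : List Char) (c : Char) (pos j : Nat)
    (h : findIdxFrom s c pos = some j) : pos ≤ j ∧ j < s.length ∧ s[j]! = c := by
  fun_induction findIdxFrom s c pos with
  | case1 p hp hc => -- found at p
      cases h
      simp_all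
  | case2 p hp hc ih =>
      have := ih h
      exact ⟨by omega, this.2⟩
  | case3 p hp => cases h

-- Source B's while-loop: jump to the next '{' / '}' from pos, keeping depth.
def loopB (s : List Char) (pos : Nat) (depth : Int) : Option Nat :=
  match hc : findIdxFrom s '}' pos with
  | none => none                      -- Python raises ValueError here
  | some nc =>
    match hb : findIdxFrom s '{' pos with
    | some nb =>
        if nb < nc then loopB s (nb+1) (depth+1)
        else if depth - 1 = 0 then some nc else loopB s (nc+1) (depth-1)
    | none => if depth - 1 = 0 then some nc else loopB s (nc+1) (depth-1)
  termination_by s.length - pos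
  decreasing_by
  · have := findIdxFrom_some s '{' pos nb hb; omega
  · have := findIdxFrom_some s '}' pos nc hc; omega
  · have := findIdxFrom_some s '}' pos nc hc; omega

def replace_outermost_boxed_alt (text : String) (new_content : String) : String :=
  let st := PySem.Str.find text "\\boxed{"
  if st = -1 then text
  else
    let s := text.toList
    let start := st.toNat
    match loopB s (start + 7) 1 with
    | some e =>
        String.ofList (s.take start ++ ("\\boxed{".toList ++ new_content.toList ++ ['}']) ++ s.drop (e+1))
    | none => text

-- ===== PRECONDITION & SPEC =====
-- Pre_ excludes exactly the inputs where A raises ValueError (the '\boxed{' is never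
-- closed: no prefix of the tail after it has more '}' than '{'); B raises there too.
def Pre_replace_outermost_boxed (text : String) (new_content : String) : Prop :=
  PySem.Str.find text "\\boxed{" = -1 ∨
  (let tail := text.toList.drop ((PySem.Str.find text "\\boxed{").toNat + 7)
   ∃ k ∈ List.range (tail.length + 1), (tail.take k).count '{' < (tail.take k).count '}')
instance (text : String) (new_content : String) : Decidable (Pre_replace_outermost_boxed text new_content) := by unfold Pre_replace_outermost_boxed; infer_instance

def pvWitness_replace_outermost_boxed : String × String := ("see \\boxed{x+{y}} now", "z")

def Spec_replace_outermost_boxed (text : String) (new_content : String) (out : String) : Prop := out = replace_outermost_boxed_alt text new_content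
instance (text : String) (new_content : String) (out : String) : Decidable (Spec_replace_outermost_boxed text new_content out) := by unfold Spec_replace_outermost_boxed; infer_instance

-- ===== CLAIM (what is proved, stated in full; the proofs are below) =====
def Claim_equal_replace_outermost_boxed : Prop := ∀ (text : String) (new_content : String), Dom_replace_outermost_boxed text new_content → Pre_replace_outermost_boxed text new_content → Spec_replace_outermost_boxed text new_content (replace_outermost_boxed text new_content)

-- ===== LEMMAS AND PROOFS =====

theorem findIdxFrom_at (s : List Char) (c : Char) (pos : Nat) (h : pos < s.length)
    (hc : s[pos] = c) : findIdxFrom s c pos = some pos := by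
  rw [findIdxFrom]; simp [h, hc]

theorem findIdxFrom_succ (s : List Char) (c : Char) (pos : Nat) (h : pos < s.length)
    (hc : s[pos] ≠ c) : findIdxFrom s c pos = findIdxFrom s c (pos+1) := by
  rw [findIdxFrom]; simp [h, hc]

theorem findIdxFrom_ge (s : List Char) (c : Char) (pos : Nat)
    (h : ¬ pos < s.length) : findIdxFrom s c pos = none := by
  rw [findIdxFrom]; simp [h]

theorem loopA_none_of_no_close (s : List Char) (i : Nat) (bc : Int)
    (h : findIdxFrom s '}' i = none) : loopA s i bc = none := by
  fun_induction loopA s i bc with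
  | case1 i bc hi hc ih =>
      exact ih (by rw [← findIdxFrom_succ s '}' i hi (by simp [hc])]; exact h)
  | case2 i bc hi hc1 hc2 _ =>
      rw [findIdxFrom_at s '}' i hi hc2] at h; cases h
  | case3 i bc hi hc1 hc2 _ ih =>
      rw [findIdxFrom_at s '}' i hi hc2] at h; cases h
  | case4 i bc hi hc1 hc2 ih =>
      exact ih (by rw [← findIdxFrom_succ s '}' i hi hc2]; exact h)
  | case5 i bc hi => rfl

theorem loopB_skip (s : List Char) (i : Nat) (d : Int) (h : i < s.length)
    (h1 : s[i] ≠ '{') (h2 : s[i] ≠ '}') : loopB s i d = loopB s (i+1) d := by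
  rw [loopB.eq_def, loopB.eq_def]
  rw [findIdxFrom_succ s '}' i h h2, findIdxFrom_succ s '{' i h h1]

theorem loopB_dead (s : List Char) (i : Nat) (d : Int) (hi : ¬ i < s.length) :
    loopB s i d = none := by
  rw [loopB.eq_def, findIdxFrom_ge s '}' i hi]

theorem loopB_close (s : List Char) (i : Nat) (d : Int) (hi : i < s.length)
    (hc : s[i] = '}') :
    loopB s i d = if d - 1 = 0 then some i else loopB s (i+1) (d-1) := by
  have hnc := findIdxFrom_at s '}' i hi hc
  rw [loopB.eq_def]
  split
  · simp_all
  · rename_i nc heq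
    rw [hnc] at heq
    injection heq with heq
    subst heq
    split
    · rename_i nb heq2
      have hspec := findIdxFrom_some s '{' i nb heq2
      have hne : nb ≠ i := by
        intro h'
        subst h'
        rw [getElem!_pos s nb hi, hc] at hspec
        exact absurd hspec.2.2 (by decide)
      rw [if_neg (by omega)]
    · rfl

theorem loopB_open (s : List Char) (i : Nat) (d : Int) (hi : i < s.length)
    (hc : s[i] = '{') :
    loopB s i d = if (findIdxFrom s '}' i).isSome then loopB s (i+1) (d+1) else none := by
  have hnb := findIdxFrom_at s '{' i hi hc
  rw [loopB.eq_def]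
  split
  · rename_i heq
    rw [heq]
    rfl
  · rename_i nc heq
    rw [heq]
    have hspec := findIdxFrom_some s '}' i nc heq
    have hne : nc ≠ i := by
      intro h'
      subst h'
      rw [getElem!_pos s nc hi, hc] at hspec
      exact absurd hspec.2.2 (by decide)
    split
    · rename_i nb heq2
      rw [hnb] at heq2
      injection heq2 with heq2
      subst heq2
      rw [if_pos (by omega)]
      rfl
    · rename_i heq2
      rw [hnb] at heq2
      cases heq2

theorem loopA_eq_loopB (s : List Char) (i : Nat) (bc : Int) :
    loopA s i bc = loopB s i bc := by
  fun_induction loopA s i bc with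
  | case1 i bc hi hc ih =>
      rw [loopB_open s i bc hi hc]
      cases hcl : findIdxFrom s '}' i with
      | none =>
          simp only [Option.isSome_none, Bool.false_eq_true, if_false]
          exact loopA_none_of_no_close s (i+1) (bc+1)
            (by rw [← findIdxFrom_succ s '}' i hi (by simp [hc])]; exact hcl)
      | some nc =>
          simp only [Option.isSome_some, if_true]
          exact ih
  | case2 i bc hi hc1 hc2 hbc =>
      rw [loopB_close s i bc hi hc2, if_pos hbc]
  | case3 i bc hi hc1 hc2 hbc ih =>
      rw [loopB_close s i bc hi hc2, if_neg hbc]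
      exact ih
  | case4 i bc hi hc1 hc2 ih =>
      rw [← loopB_skip s i bc hi hc1 hc2] at ih
      exact ih
  | case5 i bc hi =>
      rw [loopB_dead s i bc hi]

-- ===== VERDICT (by name: the statement is the Claim_ definition above) =====
theorem replace_outermost_boxed_spec : Claim_equal_replace_outermost_boxed := by
  intro text new_content _ _
  unfold Spec_replace_outermost_boxed replace_outermost_boxed replace_outermost_boxed_alt
  simp only [loopA_eq_loopB]
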